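-- pv_equiv track=rewrite | github.com/uiyoung/ppt-subtitle-maker | subtitle_maker_gui.py | auto_format_lyrics
-- ===== SOURCE A (Python) =====
-- def auto_format_lyrics(target):
--     lyrics = target.strip().split('\n')
--     lyrics = list(filter(lambda x: x != '' and x != ' ' and x != '  ', lyrics))
--
--     # 긴 가사 둘로 나누기
--     for idx, line in enumerate(lyrics):
--         if len(line) > 24:
--             splited_line = line.split(' ')
--             half = len(splited_line) // 2
--             lyrics[idx] = ' '.join(splited_line[:half])
--             lyrics.insert(idx+1, ' '.join(splited_line[half:]))
--
--     # 두줄 씩 나누기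
--     new_lyrics = ''
--     for i, line in enumerate(lyrics):
--         new_lyrics += (line + '\n')
--         if i % 2 == 1:
--             new_lyrics += '\n'
--
--     new_lyrics = new_lyrics.strip()
--     return new_lyrics
-- ===== SOURCE B (Python) =====
-- def auto_format_lyrics(target):
--     lyrics = target.strip().split('\n')
--     lyrics = [x for x in lyrics if x not in ('', ' ', '  ')]
--
--     # split long lines: emit first halves, keep re-checking the trailing half
--     out = []
--     for line in lyrics:
--         while len(line) > 24:
--             words = line.split(' ')
--             half = len(words) // 2
--             out.append(' '.join(words[:half]))
--             line = ' '.join(words[half:])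
--         out.append(line)
--
--     # group into pairs separated by a blank line
--     pairs = [out[i:i + 2] for i in range(0, len(out), 2)]
--     return '\n\n'.join('\n'.join(p) for p in pairs).strip()
-- ===== Notes on version B (the rewrite author's own statement) =====
-- stated objective: simpler
-- what changed: A mutates and re-scans the list it is iterating (set + insert-during-enumerate) and accumulates the pairing by index parity into a growing string; B instead runs a per-line while loop that appends split halves to a fresh output list, then chunks that list into consecutive pairs and joins the chunks with blank-line separators.
import Mathlib
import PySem

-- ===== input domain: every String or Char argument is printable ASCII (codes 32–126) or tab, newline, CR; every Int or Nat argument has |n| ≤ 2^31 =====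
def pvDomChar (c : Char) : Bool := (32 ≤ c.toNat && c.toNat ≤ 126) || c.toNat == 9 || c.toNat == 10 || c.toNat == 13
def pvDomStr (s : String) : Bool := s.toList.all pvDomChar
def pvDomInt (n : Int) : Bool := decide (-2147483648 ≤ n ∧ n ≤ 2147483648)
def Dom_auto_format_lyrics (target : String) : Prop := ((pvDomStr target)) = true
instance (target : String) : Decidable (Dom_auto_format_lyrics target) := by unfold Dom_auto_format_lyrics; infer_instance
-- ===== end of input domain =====

-- B replaces A's insert-into-the-iterated-list splitting pass by a per-line while loop feeding a fresh
-- output list, and the index-parity string accumulation by chunking into pairs and joining; objective: simpler.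

-- ===== PORT A =====
-- lyrics = target.strip().split('\n'); drop '', ' ', '  '  (these two Python lines are verbatim identical in A and B)
def pvFilterLines (target : String) : List (List Char) :=
  (PySem.Chars.splitOn (PySem.Chars.strip target.toList) ['\n']).filter
    (fun x => !(x == [] || x == [' '] || x == [' ', ' ']))

-- the `for idx, line in enumerate(lyrics)` loop over the LIVE list with insert-during-iteration:
-- one fuel unit per visited element, `lyrics[idx]? = none` is the iterator's exhaustion test.
-- (ws.take half / ws.drop half are Python's splited_line[:half] / splited_line[half:] with 0 ≤ half ≤ len;
--  List.insertIdx (idx+1) is Python's list.insert at the in-range index idx+1.)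
def pvSplitPassA : Nat → List (List Char) → Nat → List (List Char)
  | 0, lyrics, _ => lyrics
  | fuel + 1, lyrics, idx =>
    match lyrics[idx]? with
    | none => lyrics
    | some line =>
      if 24 < line.length then
        let ws := PySem.Chars.splitOn line [' ']
        let half := ws.length / 2
        pvSplitPassA fuel
          ((lyrics.set idx (PySem.Chars.join [' '] (ws.take half))).insertIdx (idx + 1)
            (PySem.Chars.join [' '] (ws.drop half)))
          (idx + 1)
      else pvSplitPassA fuel lyrics (idx + 1)

-- new_lyrics accumulation: line + '\n', plus an extra '\n' after odd indices
def pvJoinPairsA (lyrics : List (List Char)) : List Char :=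
  (PySem.List.enumerate lyrics).foldl
    (fun acc p =>
      let acc := acc ++ p.2 ++ ['\n']
      if PySem.Int.mod p.1 2 == 1 then acc ++ ['\n'] else acc)
    []

-- fuel 2*len+4: the pass visits at most one element per word of the input plus one per line
-- (proved below under Pre_, which is exactly what makes A's loop terminate)
def auto_format_lyrics (target : String) : String :=
  String.ofList (PySem.Chars.strip
    (pvJoinPairsA (pvSplitPassA (2 * target.toList.length + 4) (pvFilterLines target) 0)))

-- ===== PORT B =====
-- the `while len(line) > 24:` loop of Source B: emit the first half, keep splitting the second half
-- (fuel line.length+1 covers the word count of the line; proved fuel-independent below)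
def pvSplitLineB : Nat → List Char → List (List Char)
  | 0, line => [line]
  | fuel + 1, line =>
    if 24 < line.length then
      let ws := PySem.Chars.splitOn line [' ']
      let half := ws.length / 2
      PySem.Chars.join [' '] (ws.take half) :: pvSplitLineB fuel (PySem.Chars.join [' '] (ws.drop half))
    else [line]

-- pairs = [out[i:i+2] for i in range(0, len(out), 2)]
def pvChunks2 {α : Type} : List α → List (List α)
  | [] => []
  | [a] => [[a]]
  | a :: b :: t => [a, b] :: pvChunks2 t

-- '\n\n'.join('\n'.join(p) for p in pairs).strip()
def auto_format_lyrics_alt (target : String) : String :=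
  let out := (pvFilterLines target).foldl
    (fun acc line => acc ++ pvSplitLineB (line.length + 1) line) []
  String.ofList (PySem.Chars.strip
    (PySem.Chars.join ['\n', '\n'] ((pvChunks2 out).map (fun p => PySem.Chars.join ['\n'] p))))

-- ===== PRECONDITION & SPEC =====
-- Pre_ excludes inputs containing a space-free word longer than 24 characters: when such a word ends up
-- on a line of its own, A (and B) loop forever; this conservatively also excludes some inputs on which A
-- still returns (a long word whose half-line is emitted without being re-examined) — see the cites.
def Pre_auto_format_lyrics (target : String) : Prop :=
  ∀ line ∈ PySem.Chars.splitOn (PySem.Chars.strip target.toList) ['\n'],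
    ∀ w ∈ PySem.Chars.splitOn line [' '], w.length ≤ 24

instance (target : String) : Decidable (Pre_auto_format_lyrics target) := by
  unfold Pre_auto_format_lyrics; infer_instance

def pvWitness_auto_format_lyrics : String := "La la la love you\ndont you want somebody\n\nto love\nyeah"

def Spec_auto_format_lyrics (target : String) (out : String) : Prop := out = auto_format_lyrics_alt target
instance (target : String) (out : String) : Decidable (Spec_auto_format_lyrics target out) := by unfold Spec_auto_format_lyrics; infer_instance

-- ===== CLAIM (what is proved, stated in full; the proofs are below) =====
def Claim_equal_auto_format_lyrics : Prop := ∀ (target : String), Dom_auto_format_lyrics target → Pre_auto_format_lyrics target → Spec_auto_format_lyrics target (auto_format_lyrics target)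

-- ===== LEMMAS AND PROOFS =====

-- the words of a line, in Mathlib's form of split(' ')
def pvW (line : List Char) : List (List Char) := List.splitOnP (fun x => x == ' ') line

def pvCost (rest : List (List Char)) : Nat := (rest.map (fun l => (pvW l).length)).sum

-- A's trailing newlines after the pair join; always whitespace only
def pvT (ls : List (List Char)) : List Char :=
  if ls = [] then [] else if ls.length % 2 = 0 then ['\n', '\n'] else ['\n']

-- B's chunked pair join
def pvJ (ls : List (List Char)) : List Char :=
  PySem.Chars.join ['\n', '\n'] ((pvChunks2 ls).map (fun p => PySem.Chars.join ['\n'] p))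

theorem pv_go_single (c : Char) : ∀ (fuel : Nat) (l cur : List Char) (accs : List (List Char)),
    l.length ≤ fuel →
    PySem.Chars.splitOn.go [c] fuel l cur accs =
      accs.reverse ++ (List.splitOnP (fun x => x == c) l).modifyHead (cur.reverse ++ ·) := by
  intro fuel
  induction fuel with
  | zero =>
    intro l cur accs h
    have : l = [] := List.eq_nil_of_length_eq_zero (Nat.le_zero.mp h)
    subst this
    simp [PySem.Chars.splitOn.go, List.splitOnP_nil]
  | succ f ih =>
    intro l cur accs h
    cases l with
    | nil => simp [PySem.Chars.splitOn.go, List.splitOnP_nil]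
    | cons c' rest =>
      rw [PySem.Chars.splitOn.go]
      by_cases hc : c = c'
      · subst hc
        have hpre : List.isPrefixOf [c] (c :: rest) = true := by simp [List.isPrefixOf]
        simp only [hpre, if_true, List.length_cons, List.length_nil, Nat.zero_add, List.drop_succ_cons, List.drop_zero]
        rw [ih rest [] (cur.reverse :: accs) (by simpa using Nat.le_of_succ_le_succ h)]
        simp [List.splitOnP_cons]
        exact congrFun (List.modifyHead_id (α := List Char)) _
      · have hpre : List.isPrefixOf [c] (c' :: rest) = false := by
          simp [List.isPrefixOf, beq_eq_false_iff_ne]; exact hc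
        rw [if_neg (by simp [hpre])]
        rw [ih rest (c' :: cur) accs (by simpa using Nat.le_of_succ_le_succ h)]
        rw [List.splitOnP_cons]
        have : ((fun x => x == c) c') = false := by simp [beq_eq_false_iff_ne]; exact fun h' => hc h'.symm
        rw [if_neg (by simp [this])]
        rw [List.modifyHead_modifyHead]
        have hf : (fun x => (c' :: cur).reverse ++ x) = ((fun x => cur.reverse ++ x) ∘ List.cons c') := by
          funext x; simp
        rw [hf]

theorem pv_splitOn_single (c : Char) (cs : List Char) :
    PySem.Chars.splitOn cs [c] = List.splitOnP (fun x => x == c) cs := by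
  rw [PySem.Chars.splitOn, pv_go_single c (cs.length + 1) cs [] [] (Nat.le_succ _)]
  simp
  exact congrFun (List.modifyHead_id (α := List Char)) _

theorem pv_not_sep_of_mem_splitOnP {α : Type} (p : α → Bool) :
    ∀ (cs : List α), ∀ w ∈ List.splitOnP p cs, ∀ x ∈ w, p x = false := by
  intro cs
  induction cs with
  | nil => intro w hw x hx; simp [List.splitOnP_nil] at hw; subst hw; simp at hx
  | cons a as ih =>
    intro w hw x hx
    rw [List.splitOnP_cons] at hw
    by_cases ha : p a = true
    · rw [if_pos ha] at hw
      rcases List.mem_cons.mp hw with h | h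
      · subst h; simp at hx
      · exact ih w h x hx
    · rw [if_neg ha] at hw
      rcases hs : List.splitOnP p as with _ | ⟨h0, t⟩
      · exact absurd hs (List.splitOnP_ne_nil p as)
      · rw [hs] at hw
        simp only [List.modifyHead] at hw
        rcases List.mem_cons.mp hw with h | h
        · subst h
          rcases List.mem_cons.mp hx with hx | hx
          · subst hx; simpa using ha
          · exact ih h0 (by rw [hs]; exact List.mem_cons_self) x hx
        · exact ih w (by rw [hs]; exact List.mem_cons_of_mem _ h) x hx

theorem pv_sum_splitOnP {α : Type} (p : α → Bool) :
    ∀ (cs : List α), ((List.splitOnP p cs).map (fun w => w.length + 1)).sum = cs.length + 1 := by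
  intro cs
  induction cs with
  | nil => simp [List.splitOnP_nil]
  | cons a as ih =>
    rw [List.splitOnP_cons]
    by_cases ha : p a = true
    · rw [if_pos ha]; simp at ih ⊢; omega
    · rw [if_neg ha]
      rcases hs : List.splitOnP p as with _ | ⟨h0, t⟩
      · exact absurd hs (List.splitOnP_ne_nil p as)
      · rw [hs] at ih
        simp only [List.modifyHead, List.map_cons, List.sum_cons] at ih ⊢
        simp at ih ⊢
        omega

theorem pv_len_splitOnP_le {α : Type} (p : α → Bool) (cs : List α) :
    (List.splitOnP p cs).length ≤ cs.length + 1 := by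
  have := pv_sum_splitOnP p cs
  have h2 : (List.splitOnP p cs).length ≤ ((List.splitOnP p cs).map (fun w => w.length + 1)).sum := by
    clear this
    induction List.splitOnP p cs with
    | nil => simp
    | cons h t ih => simp; omega
  omega

theorem pv_resplit (ws : List (List Char)) (h : ws ≠ []) (hw : ∀ w ∈ ws, ∀ x ∈ w, (x == ' ') = false) :
    List.splitOnP (fun x => x == ' ') (PySem.Chars.join [' '] ws) = ws := by
  have : PySem.Chars.join [' '] ws = [' '].intercalate ws := rfl
  rw [this]
  have := List.splitOn_intercalate (α := Char) ws ' ' (fun l hl hx => by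
    have := hw l hl ' ' hx; simp at this) h
  simpa [List.splitOn] using this

theorem pv_two_le (line : List Char) (h24 : 24 < line.length)
    (hw : ∀ w ∈ List.splitOnP (fun x => x == ' ') line, w.length ≤ 24) :
    2 ≤ (List.splitOnP (fun x => x == ' ') line).length := by
  rcases hs : List.splitOnP (fun x => x == ' ') line with _ | ⟨h0, t⟩
  · exact absurd hs (List.splitOnP_ne_nil _ _)
  · rcases t with _ | ⟨h1, t⟩
    · exfalso
      have hline : [' '].intercalate (List.splitOn ' ' line) = line := List.intercalate_splitOn line ' '
      rw [List.splitOn] at hline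
      rw [hs] at hline
      simp [List.intercalate] at hline
      have := hw h0 (by rw [hs]; exact List.mem_cons_self)
      rw [hline] at this
      omega
    · simp

theorem pvW_eq (line : List Char) : pvW line = List.splitOnP (fun x => x == ' ') line := rfl

theorem pv_second_words (line : List Char) (h24 : 24 < line.length)
    (hw : ∀ w ∈ pvW line, w.length ≤ 24) :
    pvW (PySem.Chars.join [' '] ((pvW line).drop ((pvW line).length / 2))) = (pvW line).drop ((pvW line).length / 2) := by
  apply pv_resplit
  · have h1 : (pvW line) ≠ [] := List.splitOnP_ne_nil _ _
    have h2 : (pvW line).length / 2 < (pvW line).length :=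
      Nat.div_lt_self (List.length_pos_iff.mpr h1) (by omega)
    intro hnil
    rw [List.drop_eq_nil_iff] at hnil
    omega
  · intro w hwmem x hx
    exact pv_not_sep_of_mem_splitOnP _ line w (List.mem_of_mem_drop hwmem) x hx

theorem pv_splitB_fuel : ∀ (n : Nat) (line : List Char) (f f' : Nat),
    (∀ w ∈ pvW line, w.length ≤ 24) → (pvW line).length ≤ n →
    (pvW line).length ≤ f → (pvW line).length ≤ f' →
    pvSplitLineB f line = pvSplitLineB f' line := by
  intro n
  induction n with
  | zero =>
    intro line f f' _ hn _ _
    exact absurd hn (by have := List.splitOnP_ne_nil (fun x => x == ' ') line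
                        have := List.length_pos_iff.mpr this
                        unfold pvW; omega)
  | succ n ih =>
    intro line f f' hw hn hf hf'
    have hpos : 1 ≤ (pvW line).length :=
      List.length_pos_iff.mpr (List.splitOnP_ne_nil _ _)
    rcases f with _ | f
    · omega
    rcases f' with _ | f'
    · omega
    rw [pvSplitLineB, pvSplitLineB]
    by_cases h24 : 24 < line.length
    · rw [if_pos h24, if_pos h24]
      have h2 : 2 ≤ (pvW line).length := pv_two_le line h24 (by exact hw)
      simp only [pv_splitOn_single]
      congr 1
      set second := PySem.Chars.join [' '] ((List.splitOnP (fun x => x == ' ') line).drop ((List.splitOnP (fun x => x == ' ') line).length / 2)) with hsec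
      have hsw : pvW second = (pvW line).drop ((pvW line).length / 2) := pv_second_words line h24 hw
      apply ih second f f'
      · intro w hwm; rw [hsw] at hwm; exact hw w (List.mem_of_mem_drop hwm)
      · rw [hsw]; simp [List.length_drop]; omega
      · rw [hsw]; simp [List.length_drop]; omega
      · rw [hsw]; simp [List.length_drop]; omega
    · rw [if_neg h24, if_neg h24]

theorem pv_set_append {α : Type} (pre rest : List α) (x a : α) :
    (pre ++ x :: rest).set pre.length a = pre ++ a :: rest := by
  induction pre with
  | nil => simp
  | cons p ps ih => simp [List.set_cons_succ, ih]

theorem pv_insertIdx_append {α : Type} (pre rest : List α) (x b : α) :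
    (pre ++ x :: rest).insertIdx (pre.length + 1) b = pre ++ x :: b :: rest := by
  induction pre with
  | nil => simp
  | cons p ps ih => simp only [List.cons_append, List.length_cons, List.insertIdx_succ_cons, ih]

theorem pv_getElem?_append_mid {α : Type} (pre rest : List α) (x : α) :
    (pre ++ x :: rest)[pre.length]? = some x := by
  rw [List.getElem?_append_right (Nat.le_refl _)]
  simp

theorem pv_loop : ∀ (fuel : Nat) (pre rest : List (List Char)),
    (∀ l ∈ rest, ∀ w ∈ pvW l, w.length ≤ 24) →
    pvCost rest + 1 ≤ fuel →
    pvSplitPassA fuel (pre ++ rest) pre.length =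
      pre ++ rest.flatMap (fun l => pvSplitLineB (l.length + 1) l) := by
  intro fuel
  induction fuel with
  | zero => intro pre rest _ hf; omega
  | succ f ih =>
    intro pre rest hok hf
    cases rest with
    | nil =>
      rw [pvSplitPassA]
      simp
    | cons line rest' =>
      rw [pvSplitPassA]
      rw [pv_getElem?_append_mid]
      simp only []
      have hwl : ∀ w ∈ pvW line, w.length ≤ 24 := hok line List.mem_cons_self
      have hok' : ∀ l ∈ rest', ∀ w ∈ pvW l, w.length ≤ 24 :=
        fun l hl => hok l (List.mem_cons_of_mem _ hl)
      have hcost : pvCost (line :: rest') = (pvW line).length + pvCost rest' := by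
        simp [pvCost]
      have hpos : 1 ≤ (pvW line).length :=
        List.length_pos_iff.mpr (List.splitOnP_ne_nil _ _)
      by_cases h24 : 24 < line.length
      · rw [if_pos h24]
        simp only [pv_splitOn_single, ← pvW_eq]
        set n := (pvW line).length with hn
        have h2 : 2 ≤ n := pv_two_le line h24 hwl
        set first := PySem.Chars.join [' '] ((pvW line).take (n / 2)) with hfirst
        set second := PySem.Chars.join [' '] ((pvW line).drop (n / 2)) with hsecond
        have hset : ((pre ++ line :: rest').set pre.length first).insertIdx (pre.length + 1) second
            = (pre ++ [first]) ++ (second :: rest') := by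
          rw [pv_set_append, pv_insertIdx_append]; simp
        have hlen' : pre.length + 1 = (pre ++ [first]).length := by simp
        have hsw : pvW second = (pvW line).drop (n / 2) := pv_second_words line h24 hwl
        have hnsec : (pvW second).length = n - n / 2 := by rw [hsw]; simp [← hn]
        have hrec := ih (pre ++ [first]) (second :: rest')
          (by intro l hl
              rcases List.mem_cons.mp hl with h | h
              · subst h; intro w hw; rw [hsw] at hw; exact hwl w (List.mem_of_mem_drop hw)
              · exact hok' l h)
          (by have : pvCost (second :: rest') = (n - n / 2) + pvCost rest' := by
                simp [pvCost, hnsec]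
              rw [hcost] at hf
              omega)
        -- rewrite the goal's recursive call
        rw [show ((pre ++ line :: rest').set pre.length first).insertIdx (pre.length + 1) second
              = (pre ++ [first]) ++ (second :: rest') from hset, hlen', hrec]
        -- now compute B's side for line
        have hunfold : pvSplitLineB (line.length + 1) line = first :: pvSplitLineB line.length second := by
          rw [pvSplitLineB, if_pos h24]
          simp only [pv_splitOn_single, ← pvW_eq, ← hn]
          rw [← hfirst, ← hsecond]
        have hstab : pvSplitLineB line.length second = pvSplitLineB (second.length + 1) second := by
          have hlineW : n ≤ line.length + 1 := by
            have := pv_len_splitOnP_le (fun x => x == ' ') line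
            simpa [pvW] using this
          apply pv_splitB_fuel ((pvW second).length) second
          · intro w hw; rw [hsw] at hw; exact hwl w (List.mem_of_mem_drop hw)
          · omega
          · rw [hnsec]; omega
          · have := pv_len_splitOnP_le (fun x => x == ' ') second
            simp only [pvW] at *
            omega
        conv_rhs => rw [List.flatMap_cons, hunfold, hstab]
        simp
      · rw [if_neg h24]
        have hrec := ih (pre ++ [line]) rest' hok'
          (by rw [hcost] at hf; omega)
        rw [show pre.length + 1 = (pre ++ [line]).length by simp]
        rw [show pre ++ line :: rest' = (pre ++ [line]) ++ rest' by simp]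
        rw [hrec]
        have : pvSplitLineB (line.length + 1) line = [line] := by
          rw [pvSplitLineB, if_neg h24]
        rw [List.flatMap_cons, this]
        simp

theorem pv_chunks2_ne_nil {α : Type} (a : α) (t : List α) : pvChunks2 (a :: t) ≠ [] := by
  cases t <;> simp [pvChunks2]

theorem pv_pair : ∀ (ls : List (List Char)) (acc : List Char) (k : Int),
    PySem.Int.mod k 2 = 0 →
    (PySem.List.enumerate ls k).foldl
      (fun acc p =>
        let acc := acc ++ p.2 ++ ['\n']
        if PySem.Int.mod p.1 2 == 1 then acc ++ ['\n'] else acc) acc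
      = acc ++ pvJ ls ++ pvT ls := by
  intro ls
  induction ls using pvChunks2.induct with
  | case1 => intro acc k hk; simp [PySem.List.enumerate, pvJ, pvT, pvChunks2]
  | case2 a =>
    intro acc k hk
    have h1 : (PySem.Int.mod k 2 == 1) = false := by rw [hk]; rfl
    simp only [PySem.List.enumerate, List.foldl_cons, List.foldl_nil, h1, Bool.false_eq_true,
      if_false]
    simp [pvJ, pvT, pvChunks2, PySem.Chars.join, List.intercalate]
  | case3 a b t ih =>
    intro acc k hk
    have hmodk1 : PySem.Int.mod (k + 1) 2 = 1 := by
      rw [PySem.Int.mod_eq_emod_of_pos (by omega)] at hk ⊢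
      omega
    have hmodk2 : PySem.Int.mod (k + 1 + 1) 2 = 0 := by
      rw [PySem.Int.mod_eq_emod_of_pos (by omega)] at hk ⊢
      omega
    have h1 : (PySem.Int.mod k 2 == 1) = false := by rw [hk]; rfl
    have h2 : (PySem.Int.mod (k + 1) 2 == 1) = true := by rw [hmodk1]; rfl
    simp only [PySem.List.enumerate, List.foldl_cons, h1, h2, Bool.false_eq_true, if_false,
      if_true]
    rw [ih _ (k + 1 + 1) hmodk2]
    have hJ : pvJ (a :: b :: t) = (a ++ '\n' :: b) ++ (if t = [] then [] else '\n' :: '\n' :: pvJ t) := by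
      cases t with
      | nil => simp [pvJ, pvChunks2, PySem.Chars.join, List.intercalate]
      | cons c t' =>
        simp only [pvJ, pvChunks2, List.map_cons, PySem.Chars.join, List.intercalate]
        rcases hch : pvChunks2 (c :: t') with _ | ⟨p, ps⟩
        · exact absurd hch (pv_chunks2_ne_nil c t')
        · simp [List.intersperse]
    cases t with
    | nil =>
      rw [hJ]
      simp [pvJ, pvChunks2, pvT]
    | cons c t' =>
      have hT : pvT (a :: b :: c :: t') = pvT (c :: t') := by
        simp only [pvT, List.length_cons]
        have hpar : (t'.length + 1 + 1 + 1) % 2 = (t'.length + 1) % 2 := by omega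
        simp [hpar]
      rw [hJ, hT]
      simp

theorem pv_strip_append (s t : List Char) (ht : ∀ c ∈ t, PySem.Chars.isspace c = true) :
    PySem.Chars.strip (s ++ t) = PySem.Chars.strip s := by
  rw [PySem.Chars.strip, PySem.Chars.strip, PySem.Chars.lstrip, PySem.Chars.lstrip]
  rw [List.dropWhile_append]
  by_cases hs : (List.dropWhile PySem.Chars.isspace s).isEmpty = true
  · rw [if_pos hs]
    have ht' : List.dropWhile PySem.Chars.isspace t = [] := List.dropWhile_eq_nil_iff.mpr (by simpa using ht)
    rw [ht']
    rw [List.isEmpty_iff.mp hs]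
  · rw [if_neg hs]
    rw [PySem.Chars.rstrip, PySem.Chars.rstrip]
    rw [List.reverse_append]
    rw [List.dropWhile_append]
    have ht2 : List.dropWhile PySem.Chars.isspace t.reverse = [] :=
      List.dropWhile_eq_nil_iff.mpr (by simp; intro c hc; exact ht c hc)
    rw [ht2]
    simp

theorem pv_sublist_sum_le {α : Type} (f : α → Nat) {l₁ l₂ : List α} (h : l₁.Sublist l₂) :
    (l₁.map f).sum ≤ (l₂.map f).sum := by
  induction h with
  | slnil => simp
  | cons a _ ih => simp; omega
  | cons₂ a _ ih => simp; omega

theorem pv_strip_len_le (cs : List Char) : (PySem.Chars.strip cs).length ≤ cs.length := by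
  rw [PySem.Chars.strip, PySem.Chars.rstrip, PySem.Chars.lstrip]
  have h1 := List.length_dropWhile_le PySem.Chars.isspace cs
  have h2 := List.length_dropWhile_le PySem.Chars.isspace (List.dropWhile PySem.Chars.isspace cs).reverse
  simp at h2 ⊢
  omega

theorem pv_T_space (ls : List (List Char)) : ∀ c ∈ pvT ls, PySem.Chars.isspace c = true := by
  have h3 : pvT ls = [] ∨ pvT ls = ['\n', '\n'] ∨ pvT ls = ['\n'] := by
    unfold pvT; split_ifs <;> simp
  intro c hc
  rcases h3 with h | h | h <;> rw [h] at hc <;> simp at hc <;> subst hc <;> decide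

theorem auto_format_try (target : String) (hpre : Pre_auto_format_lyrics target) :
    auto_format_lyrics target = auto_format_lyrics_alt target := by
  rw [auto_format_lyrics, auto_format_lyrics_alt]
  have hok : ∀ l ∈ pvFilterLines target, ∀ w ∈ pvW l, w.length ≤ 24 := by
    intro l hl w hw
    have hmem : l ∈ PySem.Chars.splitOn (PySem.Chars.strip target.toList) ['\n'] :=
      (List.mem_filter.mp hl).1
    have := hpre l hmem w (by rwa [pv_splitOn_single])
    exact this
  have hfuel : pvCost (pvFilterLines target) + 1 ≤ 2 * target.toList.length + 4 := by
    set lines := PySem.Chars.splitOn (PySem.Chars.strip target.toList) ['\n'] with hl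
    have hsub : (pvFilterLines target).Sublist lines := List.filter_sublist
    have h1 : pvCost (pvFilterLines target) ≤ pvCost lines :=
      pv_sublist_sum_le (fun l => (pvW l).length) hsub
    have h2 : pvCost lines ≤ ((lines.map (fun l => l.length + 1)).sum) := by
      unfold pvCost
      apply List.sum_le_sum
      intro l _
      have := pv_len_splitOnP_le (fun x => x == ' ') l
      simpa [pvW] using this
    have h3 : (lines.map (fun l => l.length + 1)).sum = (PySem.Chars.strip target.toList).length + 1 := by
      rw [hl, pv_splitOn_single]
      exact pv_sum_splitOnP _ _
    have h4 := pv_strip_len_le target.toList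
    omega
  have hloop := pv_loop (2 * target.toList.length + 4) [] (pvFilterLines target) hok hfuel
  simp only [List.nil_append, List.length_nil] at hloop
  rw [hloop]
  rw [pvJoinPairsA]
  rw [pv_pair _ [] 0 (by decide)]
  simp only [List.nil_append]
  rw [pv_strip_append _ _ (pv_T_space _)]
  rw [PySem.List.foldl_append_eq_flatMap]
  simp [pvJ]


-- ===== VERDICT (by name: the statement is the Claim_ definition above) =====
theorem auto_format_lyrics_spec : Claim_equal_auto_format_lyrics := by
  intro target _ hpre
  unfold Spec_auto_format_lyrics
  exact auto_format_try target hpre
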